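-- pv_equiv track=rewrite | github.com/Rich43/rog | albums/3/challenge292_easy/code.py | seperator2
-- ===== SOURCE A (Python) =====
-- def seperator2(l, n):
--     l = l.split(',')
--     l2 = []
--     for num in l:
--         l2.append(int(num))
--     lst2 = []
--     test = 0
--     acc = 0
--     num2 = 0
--     for num in l2:
--         if num < test:
--             acc += 1
--             num2 = (num + (acc * n))
--             lst2.append(num2)
--             test = num
--             continue
--         test = num
--         num2 = (num + (acc * n))
--         lst2.append(num2)
--     return lst2
-- ===== SOURCE B (Python) =====
-- def seperator2(l, n):
--     # Group the values into maximal non-descending runs (a new run starts whenever a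
--     # value drops below its predecessor, with the predecessor seeded at 0), then emit
--     # each run shifted by its run index times n.
--     runs = [[]]
--     prev = 0
--     for tok in l.split(','):
--         v = int(tok)
--         if v < prev:
--             runs.append([])
--         runs[-1].append(v)
--         prev = v
--     return [v + k * n for k, run in enumerate(runs) for v in run]
-- ===== Notes on version B (the rewrite author's own statement) =====
-- stated objective: alternative
-- what changed: B partitions the parsed values into maximal non-descending runs (a new run starts where a value drops below its predecessor, predecessor seeded at 0) and then emits each run shifted by run-index*n, replacing A's fused loop with mutable test/acc counters by a group-then-enumerate pipeline over a nested run list.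
import Mathlib
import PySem

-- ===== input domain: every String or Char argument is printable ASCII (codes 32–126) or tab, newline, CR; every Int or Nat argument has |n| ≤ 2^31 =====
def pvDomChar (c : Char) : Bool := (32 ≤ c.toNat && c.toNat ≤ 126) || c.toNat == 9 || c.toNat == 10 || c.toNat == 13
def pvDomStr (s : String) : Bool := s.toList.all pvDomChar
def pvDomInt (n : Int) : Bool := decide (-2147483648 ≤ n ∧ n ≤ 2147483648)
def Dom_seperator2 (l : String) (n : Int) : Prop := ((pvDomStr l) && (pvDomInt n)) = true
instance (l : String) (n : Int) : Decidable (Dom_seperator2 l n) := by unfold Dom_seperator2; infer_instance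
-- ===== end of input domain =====

-- B groups the values into maximal non-descending runs (a run break where a value drops
-- below its predecessor, seeded at 0) and emits each run shifted by run-index * n,
-- instead of A's fused loop with mutable test/acc state; same O(n) cost.


-- ===== PORT A =====
-- A's second loop: state (lst2, test, acc), appending num + acc*n, bumping acc on decreases.
def pvALoop (n : Int) : List Int → List Int → Int → Int → List Int
  | [], lst2, _, _ => lst2
  | num :: rest, lst2, test, acc =>
      if num < test then
        pvALoop n rest (lst2 ++ [num + (acc + 1) * n]) num (acc + 1)
      else
        pvALoop n rest (lst2 ++ [num + acc * n]) num acc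

def seperator2 (l : String) (n : Int) : List Int :=
  match ((PySem.Str.split? l ",").getD []).mapM PySem.Int.ofStr? with
  | none => []        -- int(num) raises ValueError: excluded by Pre_
  | some l2 => pvALoop n l2 [] 0 0

-- ===== PORT B =====
-- Source B's grouping loop, as forward recursion: the head of the result is the continuation
-- of the current run, a drop below prev closes it ([]) and starts a new run at v.
def pvRuns : Int → List Int → List (List Int)
  | _, [] => [[]]
  | prev, v :: rest =>
      match pvRuns v rest with
      | r :: rs => if v < prev then [] :: (v :: r) :: rs else (v :: r) :: rs
      | [] => []        -- unreachable: pvRuns never returns []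

def seperator2_alt (l : String) (n : Int) : List Int :=
  match ((PySem.Str.split? l ",").getD []).mapM PySem.Int.ofStr? with
  | none => []        -- int(tok) raises ValueError: excluded by Pre_
  | some ints =>
      (PySem.List.enumerate (pvRuns 0 ints) 0).flatMap
        (fun kr => kr.2.map (fun v => v + kr.1 * n))

-- ===== PRECONDITION & SPEC =====
-- Pre_ excludes exactly the inputs where int(num) raises ValueError (a non-integer token of l.split(',')).
def Pre_seperator2 (l : String) (n : Int) : Prop :=
  ∀ s ∈ (PySem.Str.split? l ",").getD [], PySem.Int.ofStr? s ≠ none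
instance (l : String) (n : Int) : Decidable (Pre_seperator2 l n) := by unfold Pre_seperator2; infer_instance
def pvWitness_seperator2 : String × Int := ("3,1,5,2", 10)

def Spec_seperator2 (l : String) (n : Int) (out : List Int) : Prop := out = seperator2_alt l n
instance (l : String) (n : Int) (out : List Int) : Decidable (Spec_seperator2 l n out) := by unfold Spec_seperator2; infer_instance

-- ===== CLAIM (what is proved, stated in full; the proofs are below) =====
def Claim_equal_seperator2 : Prop := ∀ (l : String) (n : Int), Dom_seperator2 l n → Pre_seperator2 l n → Spec_seperator2 l n (seperator2 l n)

-- ===== LEMMAS AND PROOFS =====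
-- proof-only helper: flatten runs, offsetting run j (counted from a) by (a+j)*n
def pvOffFlat (n : Int) : List (List Int) → Int → List Int
  | [], _ => []
  | r :: rs, a => r.map (fun v => v + a * n) ++ pvOffFlat n rs (a + 1)

lemma pvRuns_ne_nil (prev : Int) (xs : List Int) : pvRuns prev xs ≠ [] := by
  induction xs generalizing prev with
  | nil => simp [pvRuns]
  | cons v rest ih =>
      have h := ih v
      cases hr : pvRuns v rest with
      | nil => exact absurd hr h
      | cons r rs =>
          simp only [pvRuns, hr]
          split <;> simp

lemma pvALoop_eq_offFlat (n : Int) (ints : List Int) :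
    ∀ (lst2 : List Int) (test acc : Int),
      pvALoop n ints lst2 test acc = lst2 ++ pvOffFlat n (pvRuns test ints) acc := by
  induction ints with
  | nil => intro lst2 test acc; simp [pvALoop, pvRuns, pvOffFlat]
  | cons v rest ih =>
      intro lst2 test acc
      cases hr : pvRuns v rest with
      | nil => exact absurd hr (pvRuns_ne_nil v rest)
      | cons r rs =>
          by_cases h : v < test
          · simp only [pvALoop, if_pos h, ih, hr, pvRuns, pvOffFlat, List.map_cons]
            simp
          · simp only [pvALoop, if_neg h, ih, hr, pvRuns, pvOffFlat, List.map_cons]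
            simp

lemma offFlat_eq_enum (n : Int) (rs : List (List Int)) :
    ∀ a : Int,
      pvOffFlat n rs a =
        (PySem.List.enumerate rs a).flatMap (fun kr => kr.2.map (fun v => v + kr.1 * n)) := by
  induction rs with
  | nil => intro a; simp [pvOffFlat, PySem.List.enumerate_nil]
  | cons r rest ih =>
      intro a
      simp [pvOffFlat, PySem.List.enumerate_cons, ih]

-- ===== VERDICT (by name: the statement is the Claim_ definition above) =====
theorem seperator2_spec : Claim_equal_seperator2 := by
  intro l n _ _
  unfold Spec_seperator2 seperator2 seperator2_alt
  cases h : ((PySem.Str.split? l ",").getD []).mapM PySem.Int.ofStr? with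
  | none => rfl
  | some ints => simp [pvALoop_eq_offFlat, offFlat_eq_enum]
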